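-- pv_equiv track=rewrite | github.com/AP-MI-2021/lab-3-MariusLapadat | main/main.py | XlaK
-- ===== SOURCE A (Python) =====
-- def XlaK(n, k):
--     """
--     Determina daca numarul n poate fi scris ca si x**k
--     :param n: un element din lista
--     :param k:puterea lui n
--     :return True sau False:
--     """
--     for i in range(2, n // 2 + 1):
--         x = i
--         for j in range(1, k):
--             x = x * x
--         if x == n:
--             return True
--     return False
-- ===== SOURCE B (Python) =====
-- def XlaK(n, k):
--     """Same answer as A: is n = i**(2**(k-1)) for some i in [2, n//2]?
--     Computed by repeated exact integer square roots instead of scanning i."""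
--     if n < 4:
--         return False
--     r = n
--     for _ in range(k - 1):
--         s = _isqrt(r)
--         if s * s != r:
--             return False
--         r = s
--     return 2 <= r <= n // 2
--
--
-- def _isqrt(x):
--     # Newton's method for floor(sqrt(x)), x >= 0
--     if x < 2:
--         return x
--     r = x
--     s = (r + x // r) // 2
--     while s < r:
--         r = s
--         s = (r + x // r) // 2
--     return r
-- ===== Notes on version B (the rewrite author's own statement) =====
-- stated objective: faster
-- what changed: Instead of trying every base i in [2, n//2] and raising each to 2^(k-1) by repeated squaring, B takes k-1 exact integer square roots of n (Newton's method), failing as soon as one is inexact, then checks the resulting root lies in [2, n//2]; intended as faster (the probe could not confirm: A timed out on most large inputs; where A finished B measured far faster).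
import Mathlib
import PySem

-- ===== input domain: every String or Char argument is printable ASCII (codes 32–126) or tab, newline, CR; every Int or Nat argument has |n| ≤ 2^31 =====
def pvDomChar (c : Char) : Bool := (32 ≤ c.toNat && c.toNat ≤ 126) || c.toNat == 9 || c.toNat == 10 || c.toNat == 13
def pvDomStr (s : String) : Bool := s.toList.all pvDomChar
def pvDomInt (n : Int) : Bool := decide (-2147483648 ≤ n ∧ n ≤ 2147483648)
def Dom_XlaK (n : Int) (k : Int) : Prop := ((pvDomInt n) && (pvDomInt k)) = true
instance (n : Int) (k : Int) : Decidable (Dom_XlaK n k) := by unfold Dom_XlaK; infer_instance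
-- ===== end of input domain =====

-- B replaces A's scan of all candidate bases i ∈ [2, n//2] (each raised to 2^(k-1) by repeated
-- squaring) with a chain of exact integer square roots of n; intended as faster (a timing run could
-- not confirm it: A timed out on most large inputs; where A finished, B measured far faster).

-- ===== PORT A =====
-- inner loop: x = i; for j in range(1, k): x = x * x
def aInner (i : Int) (k : Int) : Int :=
  (PySem.List.pyRange 1 k 1).foldl (fun x _ => x * x) i

-- outer loop with early return True
def aLoop (n : Int) (k : Int) : List Int → Bool
  | [] => false
  | i :: rest => if aInner i k == n then true else aLoop n k rest

def XlaK (n : Int) (k : Int) : Bool :=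
  aLoop n k (PySem.List.pyRange 2 (PySem.Int.floordiv n 2 + 1) 1)

-- ===== PORT B =====
-- Newton loop of Source B's _isqrt: while s < r: r = s; s = (r + x//r)//2.
-- The '0 < r' conjunct only justifies termination; every actual call has 0 < r (x ≥ 2, r starts at x).
def pyIsqrtLoop (x : Int) (r : Int) : Int :=
  let s := PySem.Int.floordiv (r + PySem.Int.floordiv x r) 2
  if _h : 0 < r ∧ s < r then pyIsqrtLoop x s else r
termination_by r.toNat
decreasing_by omega

def pyIsqrt (x : Int) : Int :=
  if x < 2 then x else pyIsqrtLoop x x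

-- the for-loop of Source B's XlaK: fuel = max(k-1, 0); none = early 'return False'
def chain : Int → Nat → Option Int
  | r, 0 => some r
  | r, m + 1 =>
    let s := pyIsqrt r
    if s * s == r then chain s m else none

def XlaK_alt (n : Int) (k : Int) : Bool :=
  if n < 4 then false
  else
    match chain n (k - 1).toNat with
    | none => false
    | some r => decide (2 ≤ r) && decide (r ≤ PySem.Int.floordiv n 2)

-- ===== PRECONDITION & SPEC =====
def Spec_XlaK (n : Int) (k : Int) (out : Bool) : Prop := out = XlaK_alt n k
instance (n : Int) (k : Int) (out : Bool) : Decidable (Spec_XlaK n k out) := by unfold Spec_XlaK; infer_instance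

-- ===== CLAIM (what is proved, stated in full; the proofs are below) =====
def Claim_equal_XlaK : Prop := ∀ (n : Int) (k : Int), Dom_XlaK n k → Spec_XlaK n k (XlaK n k)

-- ===== LEMMAS AND PROOFS =====

-- A's inner loop raises i to the power 2^(k-1) (2^0 when k ≤ 1)
theorem foldl_sq (l : List Int) (i : Int) :
    l.foldl (fun x _ => x * x) i = i ^ (2 ^ l.length) := by
  induction l generalizing i with
  | nil => simp
  | cons a t ih =>
    simp only [List.foldl_cons, List.length_cons, ih, pow_succ]
    ring

theorem aInner_eq (i k : Int) : aInner i k = i ^ (2 ^ (k - 1).toNat) := by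
  simp [aInner, foldl_sq, PySem.List.length_pyRange_one]

theorem aLoop_true_iff (n k : Int) (l : List Int) :
    aLoop n k l = true ↔ ∃ i ∈ l, aInner i k = n := by
  induction l with
  | nil => simp [aLoop]
  | cons a t ih =>
    by_cases h : aInner a k = n
    · simp [aLoop, h]
    · simp [aLoop, h, ih]

theorem XlaK_true_iff (n k : Int) :
    XlaK n k = true ↔ ∃ i, 2 ≤ i ∧ i ≤ PySem.Int.floordiv n 2 ∧ i ^ (2 ^ (k - 1).toNat) = n := by
  rw [XlaK, aLoop_true_iff]
  constructor
  · rintro ⟨i, hmem, hval⟩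
    rw [PySem.List.mem_pyRange_one] at hmem
    exact ⟨i, hmem.1, by omega, by rw [← aInner_eq i k]; exact hval⟩
  · rintro ⟨i, h2, hle, hval⟩
    exact ⟨i, PySem.List.mem_pyRange_one.mpr ⟨h2, by omega⟩, by rw [aInner_eq]; exact hval⟩

-- Newton's method returns a when a is exactly floor(sqrt x), provided it starts at r ≥ a ≥ 1
theorem pyIsqrtLoop_eq (x a : Int) (ha1 : 1 ≤ a) (hlo : a * a ≤ x)
    (hhi : x < (a + 1) * (a + 1)) (r : Int) (har : a ≤ r) (hr : 0 < r) :
    pyIsqrtLoop x r = a := by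
  induction r using pyIsqrtLoop.induct (x := x) with
  | case1 r s' h ih =>
    rw [pyIsqrtLoop, dif_pos h]
    obtain ⟨hr0, hsr⟩ := h
    have hq : PySem.Int.floordiv x r = x / r := PySem.Int.floordiv_eq_ediv_of_pos hr0
    have hs0 : PySem.Int.floordiv (r + PySem.Int.floordiv x r) 2 = (r + x / r) / 2 := by
      rw [hq]; exact PySem.Int.floordiv_eq_ediv_of_pos (by norm_num)
    have hs' : s' = (r + x / r) / 2 := hs0
    have hd1 : r * (x / r) + x % r = x := Int.mul_ediv_add_emod x r
    have hm1 : 0 ≤ x % r := Int.emod_nonneg x (by omega)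
    have hm2 : x % r < r := Int.emod_lt_of_pos x hr0
    have key : r * (2 * a - 1) < r * (r + x / r) := by nlinarith [sq_nonneg (r - a)]
    have h2a : 2 * a - 1 < r + x / r := lt_of_mul_lt_mul_left key (by omega)
    exact ih (by omega) (by omega)
  | case2 r s' h =>
    rw [pyIsqrtLoop, dif_neg h]
    have hq : PySem.Int.floordiv x r = x / r := PySem.Int.floordiv_eq_ediv_of_pos hr
    have hs0 : PySem.Int.floordiv (r + PySem.Int.floordiv x r) 2 = (r + x / r) / 2 := by
      rw [hq]; exact PySem.Int.floordiv_eq_ediv_of_pos (by norm_num)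
    have hs' : s' = (r + x / r) / 2 := hs0
    have hrs : r ≤ (r + x / r) / 2 := by
      rcases not_and_or.mp h with h1 | h1
      · omega
      · omega
    have hd1 : r * (x / r) + x % r = x := Int.mul_ediv_add_emod x r
    have hm1 : 0 ≤ x % r := Int.emod_nonneg x (by omega)
    have hm2 : x % r < r := Int.emod_lt_of_pos x hr
    have hrq : r ≤ x / r := by omega
    nlinarith

-- isqrt of an exact square t*t (t ≥ 2) is t
theorem pyIsqrt_sq (t : Int) (ht : 2 ≤ t) : pyIsqrt (t * t) = t := by
  have h4 : ¬ (t * t < 2) := by nlinarith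
  rw [pyIsqrt, if_neg h4]
  exact pyIsqrtLoop_eq (t * t) t (by omega) le_rfl (by nlinarith) (t * t) (by nlinarith) (by nlinarith)

theorem chain_sound (m : Nat) (r s : Int) (h : chain r m = some s) :
    s ^ (2 ^ m) = r := by
  induction m generalizing r with
  | zero => simp [chain] at h; simp [h]
  | succ m ih =>
    rw [chain] at h
    by_cases hq : pyIsqrt r * pyIsqrt r = r
    · simp only [hq, beq_self_eq_true, if_true] at h
      have := ih (pyIsqrt r) h
      calc s ^ (2 ^ (m + 1)) = (s ^ (2 ^ m)) ^ 2 := by rw [← pow_mul, pow_succ]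
        _ = r := by rw [this, sq]; exact hq
    · have hf : (pyIsqrt r * pyIsqrt r == r) = false := beq_eq_false_iff_ne.mpr hq
      simp only [hf, Bool.false_eq_true, if_false] at h
      exact absurd h (by simp)

theorem chain_complete (m : Nat) (s : Int) (hs : 2 ≤ s) :
    chain (s ^ (2 ^ m)) m = some s := by
  induction m with
  | zero => simp [chain]
  | succ m ih =>
    have ht : 2 ≤ s ^ (2 ^ m) := le_trans hs (le_self_pow₀ (by omega) (by positivity))
    have hsplit : s ^ (2 ^ (m + 1)) = (s ^ (2 ^ m)) * (s ^ (2 ^ m)) := by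
      rw [← sq, ← pow_mul, pow_succ]
    rw [chain, hsplit]
    simp only [pyIsqrt_sq (s ^ (2 ^ m)) ht, beq_self_eq_true, if_true]
    exact ih

theorem XlaK_alt_true_iff (n k : Int) :
    XlaK_alt n k = true ↔
      ¬ n < 4 ∧ ∃ r, chain n (k - 1).toNat = some r ∧ 2 ≤ r ∧ r ≤ PySem.Int.floordiv n 2 := by
  rw [XlaK_alt]
  by_cases h4 : n < 4
  · simp [h4]
  · rw [if_neg h4]
    cases hc : chain n (k - 1).toNat with
    | none => simp [h4]
    | some r =>
      simp only [Bool.and_eq_true, decide_eq_true_eq]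
      constructor
      · rintro ⟨h1, h2⟩; exact ⟨h4, r, rfl, h1, h2⟩
      · rintro ⟨-, r', hr', h1, h2⟩
        obtain rfl : r' = r := (Option.some.inj hr').symm
        exact ⟨h1, h2⟩

-- ===== VERDICT (by name: the statement is the Claim_ definition above) =====
theorem XlaK_spec : Claim_equal_XlaK := by
  intro n k _
  unfold Spec_XlaK
  rw [Bool.eq_iff_iff, XlaK_true_iff, XlaK_alt_true_iff]
  have hdiv : PySem.Int.floordiv n 2 = n / 2 := PySem.Int.floordiv_eq_ediv_of_pos (by omega)
  constructor
  · rintro ⟨i, h2, hle, hval⟩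
    have hn : 4 ≤ n := by
      rw [hdiv] at hle; omega
    exact ⟨by omega, i, by rw [← hval]; exact chain_complete _ i h2, h2, hle⟩
  · rintro ⟨h4, r, hc, h2, hle⟩
    exact ⟨r, h2, hle, chain_sound _ n r hc⟩
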